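-- pv_equiv track=rewrite | github.com/Manticoree/lidco | src/lidco/adaptive/style.py | _detect_comment_style
-- ===== SOURCE A (Python) =====
-- def _detect_comment_style(lines: list[str]) -> str:
--     has_hash = any(line.lstrip().startswith("#") for line in lines)
--     has_slash = any(line.lstrip().startswith("//") for line in lines)
--     has_docstring = any('"""' in line or "'''" in line for line in lines)
--
--     if has_docstring:
--         return "docstring"
--     if has_hash:
--         return "hash"
--     if has_slash:
--         return "slash"
--     return "none"
-- ===== SOURCE B (Python) =====
-- def _detect_comment_style(lines: list[str]) -> str:
--     saw_hash = False
--     saw_slash = False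
--     for line in lines:
--         if '"""' in line or "'''" in line:
--             return "docstring"
--         stripped = line.lstrip()
--         saw_hash = saw_hash or stripped.startswith("#")
--         saw_slash = saw_slash or stripped.startswith("//")
--     if saw_hash:
--         return "hash"
--     if saw_slash:
--         return "slash"
--     return "none"
-- ===== Notes on version B (the rewrite author's own statement) =====
-- stated objective: alternative
-- what changed: Replaces A's three separate any() scans over the whole list with one accumulating pass that early-returns on the first docstring marker and carries hash/slash flags.
import Mathlib
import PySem

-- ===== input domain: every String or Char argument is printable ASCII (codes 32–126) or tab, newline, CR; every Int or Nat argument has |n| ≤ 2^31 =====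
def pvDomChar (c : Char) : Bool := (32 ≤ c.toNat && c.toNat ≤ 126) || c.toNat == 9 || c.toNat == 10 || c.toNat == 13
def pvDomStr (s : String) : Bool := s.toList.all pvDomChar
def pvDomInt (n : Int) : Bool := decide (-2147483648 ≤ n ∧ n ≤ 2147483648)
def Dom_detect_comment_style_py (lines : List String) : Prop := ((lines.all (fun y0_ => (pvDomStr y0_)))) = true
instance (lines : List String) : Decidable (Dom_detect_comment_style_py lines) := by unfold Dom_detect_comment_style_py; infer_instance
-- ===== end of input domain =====

-- B replaces A's three whole-list any() scans with one accumulating pass that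
-- early-returns on the first docstring marker (objective: alternative; same result).

-- ===== PORT A =====
def detect_comment_style_py (lines : List String) : String :=
  let has_hash := lines.any (fun line => PySem.Str.startswith (PySem.Str.lstrip line) "#")
  let has_slash := lines.any (fun line => PySem.Str.startswith (PySem.Str.lstrip line) "//")
  let has_docstring := lines.any (fun line => PySem.Str.isIn "\"\"\"" line || PySem.Str.isIn "'''" line)
  if has_docstring then "docstring"
  else if has_hash then "hash"
  else if has_slash then "slash"
  else "none"

-- ===== PORT B =====
-- single pass carrying the two flags; early return on a docstring marker
def detectLoop : List String → Bool → Bool → String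
  | [], sawHash, sawSlash =>
      if sawHash then "hash" else if sawSlash then "slash" else "none"
  | line :: rest, sawHash, sawSlash =>
      if PySem.Str.isIn "\"\"\"" line || PySem.Str.isIn "'''" line then "docstring"
      else
        let stripped := PySem.Str.lstrip line
        detectLoop rest (sawHash || PySem.Str.startswith stripped "#")
                        (sawSlash || PySem.Str.startswith stripped "//")

def detect_comment_style_py_alt (lines : List String) : String :=
  detectLoop lines false false

-- ===== PRECONDITION & SPEC =====
def Spec_detect_comment_style_py (lines : List String) (out : String) : Prop := out = detect_comment_style_py_alt lines
instance (lines : List String) (out : String) : Decidable (Spec_detect_comment_style_py lines out) := by unfold Spec_detect_comment_style_py; infer_instance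

-- ===== CLAIM (what is proved, stated in full; the proofs are below) =====
def Claim_equal_detect_comment_style_py : Prop := ∀ (lines : List String), Dom_detect_comment_style_py lines → Spec_detect_comment_style_py lines (detect_comment_style_py lines)

-- ===== LEMMAS AND PROOFS =====

-- characterisation of the single-pass loop in terms of the three scans
theorem detectLoop_eq (lines : List String) (h s : Bool) :
    detectLoop lines h s =
      if lines.any (fun line => PySem.Str.isIn "\"\"\"" line || PySem.Str.isIn "'''" line) then "docstring"
      else if h || lines.any (fun line => PySem.Str.startswith (PySem.Str.lstrip line) "#") then "hash"
      else if s || lines.any (fun line => PySem.Str.startswith (PySem.Str.lstrip line) "//") then "slash"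
      else "none" := by
  induction lines generalizing h s with
  | nil => simp [detectLoop]
  | cons line rest ih =>
      rw [detectLoop, ih]
      simp only [List.any_cons]
      cases hd : (PySem.Str.isIn "\"\"\"" line || PySem.Str.isIn "'''" line) <;>
        simp [hd, Bool.or_assoc]

-- ===== VERDICT (by name: the statement is the Claim_ definition above) =====
theorem detect_comment_style_py_spec : Claim_equal_detect_comment_style_py := by
  intro lines _
  unfold Spec_detect_comment_style_py detect_comment_style_py detect_comment_style_py_alt
  rw [detectLoop_eq]
  simp
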